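-- pv_equiv track=rewrite | github.com/ankitmishra-IDXI0115/Python-Assignment | Ques45.py | pokemon_chain
-- ===== SOURCE A (Python) =====
-- def pokemon_chain(words):
--     chain = [words[0]]
--     used = {words[0]}
--
--     while True:
--         last = chain[-1][-1]
--         next_word = None
--
--         for w in words:
--             if w not in used and w[0] == last:
--                 next_word = w
--                 break
--
--         if not next_word:
--             break
--
--         chain.append(next_word)
--         used.add(next_word)
--
--     return chain
-- ===== SOURCE B (Python) =====
-- def pokemon_chain(words):
--     # Index words by first letter; each bucket is a stack built in reverse
--     # order, so pop() yields the earliest remaining word with that letter.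
--     buckets = {}
--     for w in reversed(words):
--         buckets.setdefault(w[0], []).append(w)
--     chain = [words[0]]
--     used = {words[0]}
--     last = words[0][-1]
--     while True:
--         stack = buckets.get(last)
--         nxt = None
--         while stack:
--             w = stack.pop()
--             if w not in used:
--                 nxt = w
--                 break
--         if nxt is None:
--             break
--         chain.append(nxt)
--         used.add(nxt)
--         last = nxt[-1]
--     return chain
-- ===== Notes on version B (the rewrite author's own statement) =====
-- stated objective: faster
-- what changed: Replaced the per-step rescan of the whole word list with first-letter buckets (stacks in reverse order) consumed by pop(), so each word is examined O(1) times overall.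
import Mathlib
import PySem

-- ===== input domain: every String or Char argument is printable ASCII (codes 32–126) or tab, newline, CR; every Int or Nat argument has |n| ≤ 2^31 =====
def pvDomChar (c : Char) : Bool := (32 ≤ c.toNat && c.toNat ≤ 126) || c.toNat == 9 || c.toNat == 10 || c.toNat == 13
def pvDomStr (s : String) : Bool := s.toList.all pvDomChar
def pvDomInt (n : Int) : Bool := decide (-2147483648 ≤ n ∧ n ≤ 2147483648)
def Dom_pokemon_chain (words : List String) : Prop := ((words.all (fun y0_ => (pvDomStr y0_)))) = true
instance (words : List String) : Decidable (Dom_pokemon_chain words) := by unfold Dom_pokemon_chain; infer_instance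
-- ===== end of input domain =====

-- B replaces A's per-step rescan of the whole word list with first-letter buckets
-- (stacks whose top is the earliest remaining word) consumed as the chain grows.

-- ===== PORT A =====
-- the inner 'for w in words: if w not in used and w[0] == last: next_word = w; break'
def pvFindA (used : PySem.Set String) (last : Char) : List String → Option String
  | [] => none
  | w :: rest =>
    if !(PySem.Set.contains used w) then
      match PySem.Str.pyGet? w 0 with
      | none => none        -- Python raises IndexError here (w = ""); outside Pre_
      | some c => if c = last then some w else pvFindA used last rest
    else pvFindA used last rest

-- the 'while True' loop; fuel bounds the number of iterations (≤ words.length)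
def pvLoopA (words : List String) : Nat → List String → PySem.Set String → List String
  | 0, chain, _ => chain
  | n + 1, chain, used =>
    match PySem.List.pyGet? chain (-1) with
    | none => chain         -- unreachable: chain is never empty
    | some lw =>
      match PySem.Str.pyGet? lw (-1) with
      | none => chain       -- Python raises IndexError (last word = ""); outside Pre_
      | some last =>
        match pvFindA used last words with
        | none => chain     -- 'if not next_word: break'
        | some w =>
          if w = "" then chain   -- '' is falsy: 'if not next_word' also breaks here
          else pvLoopA words n (chain ++ [w]) (PySem.Set.add used w)

def pokemon_chain (words : List String) : List String :=
  match words with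
  | [] => []                -- Python raises IndexError on words[0]; outside Pre_
  | w0 :: _ => pvLoopA words words.length [w0] (PySem.Set.add PySem.Set.empty w0)

-- ===== PORT B =====
-- 'for w in reversed(words): buckets.setdefault(w[0], []).append(w)'.
-- Each Python bucket is used purely as a stack; the port stores a stack with its
-- top (Python's last element) at the HEAD of the Lean list, so append = cons and
-- pop() = head/tail.
def pvBuild (words : List String) : PySem.Dict Char (List String) :=
  words.reverse.foldl
    (fun d w =>
      match PySem.Str.pyGet? w 0 with
      | none => d           -- Python raises IndexError here (w = ""); outside Pre_
      | some c => PySem.Dict.modify d c [] (fun b => w :: b))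
    PySem.Dict.empty

-- 'while stack: w = stack.pop(); if w not in used: nxt = w; break'
def pvPop (used : PySem.Set String) : List String → Option String × List String
  | [] => (none, [])
  | w :: rest => if PySem.Set.contains used w then pvPop used rest else (some w, rest)

-- B's 'while True' loop; same fuel bound as A's port
def pvLoopB (n : Nat) (bk : PySem.Dict Char (List String)) (chain : List String)
    (used : PySem.Set String) (last : Char) : List String :=
  match n with
  | 0 => chain
  | n + 1 =>
    match pvPop used (PySem.Dict.getD bk last []) with
    | (none, _) => chain    -- 'if nxt is None: break'
    | (some w, rest) =>
      match PySem.Str.pyGet? w (-1) with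
      | none => chain       -- unreachable: every bucket entry is a nonempty word
      | some c =>
        pvLoopB n (PySem.Dict.insert bk last rest) (chain ++ [w]) (PySem.Set.add used w) c

def pokemon_chain_alt (words : List String) : List String :=
  match words with
  | [] => []                -- Python raises IndexError on words[0]; outside Pre_
  | w0 :: _ =>
    match PySem.Str.pyGet? w0 (-1) with
    | none => [w0]          -- Python raises IndexError (words[0] = ""); outside Pre_
    | some last => pvLoopB words.length (pvBuild words) [w0] (PySem.Set.add PySem.Set.empty w0) last

-- ===== PRECONDITION & SPEC =====
-- Pre_ excludes exactly the inputs on which the Python A raises IndexError: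
-- the empty list (words[0]) and any list containing "" (w[0] / chain[-1][-1]).
def Pre_pokemon_chain (words : List String) : Prop := words ≠ [] ∧ "" ∉ words
instance (words : List String) : Decidable (Pre_pokemon_chain words) := by unfold Pre_pokemon_chain; infer_instance
def pvWitness_pokemon_chain : List String := (["ab", "ba", "ac"])
def Spec_pokemon_chain (words : List String) (out : List String) : Prop := out = pokemon_chain_alt words
instance (words : List String) (out : List String) : Decidable (Spec_pokemon_chain words out) := by unfold Spec_pokemon_chain; infer_instance

-- ===== CLAIM (what is proved, stated in full; the proofs are below) =====
def Claim_equal_pokemon_chain : Prop := ∀ (words : List String), Dom_pokemon_chain words → Pre_pokemon_chain words → Spec_pokemon_chain words (pokemon_chain words)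

-- ===== LEMMAS AND PROOFS =====

-- a nonempty word has a first and a last character
theorem pvFirst_isSome (w : String) (ht : w ≠ "") : ∃ c, PySem.Str.pyGet? w 0 = some c := by
  have hl : w.toList ≠ [] := fun hl => ht (String.toList_eq_nil_iff.mp hl)
  simp only [PySem.Str.pyGet?, PySem.Chars.pyGet?, PySem.List.pyGet?_zero]
  cases h : w.toList with
  | nil => exact absurd h hl
  | cons a t => exact ⟨a, by simp⟩

theorem pvLast_isSome (w : String) (ht : w ≠ "") : ∃ c, PySem.Str.pyGet? w (-1) = some c := by
  have hl : w.toList ≠ [] := fun hl => ht (String.toList_eq_nil_iff.mp hl)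
  simp only [PySem.Str.pyGet?, PySem.Chars.pyGet?, PySem.List.pyGet?_neg_one]
  exact ⟨w.toList.getLast hl, List.getLast?_eq_some_getLast hl⟩

theorem pvContains_iff (s : PySem.Set String) (x : String) :
    PySem.Set.contains s x = true ↔ x ∈ s := by
  simp [PySem.Set.contains]

theorem pvContains_add_of (s : PySem.Set String) (w x : String)
    (h : PySem.Set.contains s x = true) : PySem.Set.contains (PySem.Set.add s w) x = true := by
  rw [pvContains_iff] at *
  exact (PySem.Set.mem_add _ _ _).mpr (Or.inl h)

theorem pvContains_add_self (s : PySem.Set String) (w : String) :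
    PySem.Set.contains (PySem.Set.add s w) w = true := by
  rw [pvContains_iff]
  exact (PySem.Set.mem_add _ _ _).mpr (Or.inr rfl)

-- A's scan over words = find the first unused word in the bucket-order filter
theorem pvFindA_eq (used : PySem.Set String) (last : Char) :
    ∀ l : List String, "" ∉ l →
    pvFindA used last l =
      (l.filter (fun w => PySem.Str.pyGet? w 0 == some last)).find?
        (fun w => !PySem.Set.contains used w) := by
  intro l
  induction l with
  | nil => intro _; rfl
  | cons w rest ih =>
    intro hmem
    have hw : w ≠ "" := fun h => hmem (by simp [h])
    have hrest : "" ∉ rest := fun h => hmem (by simp [h])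
    obtain ⟨c, hc⟩ := pvFirst_isSome w hw
    have hc' : PySem.List.pyGet? w.toList 0 = some c := by
      simpa [PySem.Str.pyGet?, PySem.Chars.pyGet?] using hc
    rw [List.filter_cons]
    by_cases hu : w ∈ used
    · rw [show pvFindA used last (w :: rest) = pvFindA used last rest by
        simp [pvFindA, hu], ih hrest]
      by_cases hcl : c = last
      · rw [if_pos (by simp [hc', hcl]), List.find?_cons_of_neg (by simp [hu])]
      · rw [if_neg (by simp [hc', hcl])]
    · by_cases hcl : c = last
      · rw [if_pos (by simp [hc', hcl]), List.find?_cons_of_pos (by simp [hu])]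
        simp [pvFindA, hu, hc', hcl]
      · rw [if_neg (by simp [hc', hcl]), ← ih hrest]
        simp [pvFindA, hu, hc', hcl]

theorem pvPop_fst (used : PySem.Set String) :
    ∀ s : List String,
      (pvPop used s).1 = s.find? (fun w => !PySem.Set.contains used w) := by
  intro s
  induction s with
  | nil => rfl
  | cons w rest ih =>
    by_cases hu : w ∈ used
    · rw [show pvPop used (w :: rest) = pvPop used rest by simp [pvPop, hu], ih,
        List.find?_cons_of_neg (by simp [hu])]
    · rw [show pvPop used (w :: rest) = (some w, rest) by simp [pvPop, hu],
        List.find?_cons_of_pos (by simp [hu])]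

theorem pvPop_some (used : PySem.Set String) :
    ∀ s w rest, pvPop used s = (some w, rest) →
      ∃ sk, s = sk ++ w :: rest ∧ ∀ x ∈ sk, PySem.Set.contains used x = true := by
  intro s
  induction s with
  | nil => intro w rest h; simp [pvPop] at h
  | cons v t ih =>
    intro w rest h
    by_cases hu : v ∈ used
    · rw [show pvPop used (v :: t) = pvPop used t by simp [pvPop, hu]] at h
      obtain ⟨sk, h1, h2⟩ := ih w rest h
      refine ⟨v :: sk, by simp [h1], ?_⟩
      intro x hx
      rcases List.mem_cons.mp hx with hx | hx
      · exact hx ▸ (pvContains_iff used v).mpr hu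
      · exact h2 x hx
    · rw [show pvPop used (v :: t) = (some v, t) by simp [pvPop, hu]] at h
      obtain ⟨h1, h2⟩ := Prod.mk.injEq .. ▸ h
      injection h1 with h1
      exact ⟨[], by simp [← h1, ← h2], by simp⟩

-- buckets after the build phase: exactly the first-letter filters of words
theorem pvBuild_aux (c : Char) :
    ∀ (l : List String) (d : PySem.Dict Char (List String)),
    PySem.Dict.getD
      (l.foldl (fun d w =>
        match PySem.Str.pyGet? w 0 with
        | none => d
        | some c' => PySem.Dict.modify d c' [] (fun b => w :: b)) d) c [] =
      (l.filter (fun w => PySem.Str.pyGet? w 0 == some c)).reverse ++ PySem.Dict.getD d c [] := by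
  intro l
  induction l with
  | nil => intro d; simp
  | cons w t ih =>
    intro d
    rw [List.foldl_cons, List.filter_cons]
    cases hc : PySem.Str.pyGet? w 0 with
    | none =>
      rw [if_neg (by simp)]
      exact ih d
    | some c' =>
      rw [show (match (some c' : Option Char) with
        | none => d
        | some c'' => PySem.Dict.modify d c'' [] (fun b => w :: b)) =
          PySem.Dict.modify d c' [] (fun b => w :: b) from rfl, ih,
        PySem.Dict.getD_modify]
      by_cases hcc : c = c'
      · subst hcc
        simp
      · simp [hcc, Ne.symm hcc]

theorem pvBuild_getD (words : List String) (c : Char) :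
    PySem.Dict.getD (pvBuild words) c [] =
      words.filter (fun w => PySem.Str.pyGet? w 0 == some c) := by
  unfold pvBuild
  rw [pvBuild_aux]
  have he : PySem.Dict.getD (PySem.Dict.empty : PySem.Dict Char (List String)) c [] = [] := rfl
  rw [he, List.append_nil, List.filter_reverse, List.reverse_reverse]

-- the loop invariant: each bucket is a suffix of the first-letter filter of words,
-- and everything dropped from it is already used
def pvInv (words : List String) (bk : PySem.Dict Char (List String))
    (used : PySem.Set String) : Prop :=
  ∀ c, ∃ pre, words.filter (fun w => PySem.Str.pyGet? w 0 == some c) = pre ++ PySem.Dict.getD bk c []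
        ∧ ∀ x ∈ pre, PySem.Set.contains used x = true

-- the two loops agree step for step
theorem pvLoop_eq (words : List String) (hw : "" ∉ words) :
    ∀ (n : Nat) (chain : List String) (used : PySem.Set String)
      (bk : PySem.Dict Char (List String)) (lw : String) (last : Char),
      pvInv words bk used →
      chain.getLast? = some lw →
      PySem.Str.pyGet? lw (-1) = some last →
      pvLoopA words n chain used = pvLoopB n bk chain used last := by
  intro n
  induction n with
  | zero => intro chain used bk lw last _ _ _; rfl
  | succ n ih =>
    intro chain used bk lw last hinv hlast hlc
    obtain ⟨pre, hfil, hpre⟩ := hinv last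
    have hstack : pvFindA used last words = (pvPop used (PySem.Dict.getD bk last [])).1 := by
      rw [pvFindA_eq used last words hw, hfil, List.find?_append, pvPop_fst]
      have hnone : pre.find? (fun w => !PySem.Set.contains used w) = none := by
        rw [List.find?_eq_none]
        intro x hx
        simp [(pvContains_iff used x).mp (hpre x hx)]
      rw [hnone, Option.none_or]
    have hA : PySem.List.pyGet? chain (-1) = some lw := by
      rw [PySem.List.pyGet?_neg_one]; exact hlast
    cases hp : pvPop used (PySem.Dict.getD bk last []) with
    | mk o rest =>
      cases o with
      | none =>
        simp only [pvLoopA, pvLoopB, hA, hlc, hstack, hp]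
      | some w =>
        -- w is an unused word of the bucket for `last`
        obtain ⟨sk, hsplit, hsk⟩ := pvPop_some used _ w rest hp
        have hwmem : w ∈ words := by
          have hwf : w ∈ words.filter (fun w => PySem.Str.pyGet? w 0 == some last) := by
            rw [hfil, hsplit]; simp
          exact List.mem_of_mem_filter hwf
        have hwne : w ≠ "" := fun h => hw (h ▸ hwmem)
        obtain ⟨c, hcw⟩ := pvLast_isSome w hwne
        have hinv' : pvInv words (PySem.Dict.insert bk last rest) (PySem.Set.add used w) := by
          intro c'
          by_cases hcl : c' = last
          · subst hcl
            refine ⟨pre ++ sk ++ [w], ?_, ?_⟩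
            · rw [hfil, hsplit, PySem.Dict.getD_insert_self]
              simp
            · intro x hx
              simp only [List.append_assoc, List.mem_append, List.mem_singleton] at hx
              rcases hx with hx | hx | hx
              · exact pvContains_add_of _ _ _ (hpre x hx)
              · exact pvContains_add_of _ _ _ (hsk x hx)
              · exact hx ▸ pvContains_add_self _ _
          · obtain ⟨pre', h1, h2⟩ := hinv c'
            refine ⟨pre', ?_, fun x hx => pvContains_add_of _ _ _ (h2 x hx)⟩
            rwa [PySem.Dict.getD_insert_of_ne _ _ _ hcl]
        have hrec := ih (chain ++ [w]) (PySem.Set.add used w)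
          (PySem.Dict.insert bk last rest) w c hinv' (by simp) hcw
        simp only [pvLoopA, pvLoopB, hA, hlc, hstack, hp, if_neg hwne, hcw]
        exact hrec

-- ===== VERDICT (by name: the statement is the Claim_ definition above) =====
theorem pokemon_chain_spec : Claim_equal_pokemon_chain := by
  intro words _ hpre
  obtain ⟨hne, hnm⟩ := hpre
  unfold Spec_pokemon_chain
  cases words with
  | nil => exact absurd rfl hne
  | cons w0 t =>
    have hw0 : w0 ≠ "" := fun h => hnm (by simp [h])
    obtain ⟨last0, hl0⟩ := pvLast_isSome w0 hw0
    have hinv : pvInv (w0 :: t) (pvBuild (w0 :: t)) (PySem.Set.add PySem.Set.empty w0) := by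
      intro c
      exact ⟨[], by simp [pvBuild_getD], by simp⟩
    simp only [pokemon_chain, pokemon_chain_alt, hl0]
    exact pvLoop_eq (w0 :: t) hnm (w0 :: t).length [w0]
      (PySem.Set.add PySem.Set.empty w0) (pvBuild (w0 :: t)) w0 last0 hinv (by simp) hl0
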